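-- pv_equiv track=rewrite | github.com/jelledochy/estate-chat-V2 | streamlit_app/pages/3_people.py | build_global_tree_levels
-- ===== SOURCE A (Python) =====
-- from collections import defaultdict
--
-- def build_global_tree_levels(
--     scope: set[str],
--     relation_map: dict[tuple[str, str, str], set[str]],
-- ) -> dict[str, int]:
--     # Fixed 3-row family tree:
--     # 0 = grandparents/top generation, 1 = parents + partners, 2 = children.
--     parent_edges: list[tuple[str, str]] = []
--     partner_pairs: list[tuple[str, str]] = []
--
--     for (source, target, relation), evidence_docs in relation_map.items():
--         if not evidence_docs or source not in scope or target not in scope: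
--             continue
--
--         if relation == "parent_of":
--             parent_edges.append((source, target))
--         elif relation == "partner_of":
--             partner_pairs.append((source, target))
--
--     children_by_parent: dict[str, set[str]] = defaultdict(set)
--     parents_by_child: dict[str, set[str]] = defaultdict(set)
--     for parent, child in parent_edges:
--         children_by_parent[parent].add(child)
--         parents_by_child[child].add(parent)
--
--     parent_nodes = set(children_by_parent.keys())
--     child_nodes = set(parents_by_child.keys())
--
--     top_generation = {name for name in parent_nodes if name not in child_nodes}
--     if not top_generation:
--         top_generation = set(parent_nodes)
--
--     second_generation: set[str] = set()
--     for grandparent in top_generation: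
--         second_generation.update(children_by_parent.get(grandparent) or set())
--
--     third_generation: set[str] = set()
--     for parent in second_generation:
--         third_generation.update(children_by_parent.get(parent) or set())
--
--     # Put partners on the same row as their linked family member.
--     changed = True
--     while changed:
--         changed = False
--         for left, right in partner_pairs:
--             if left in top_generation and right not in top_generation:
--                 top_generation.add(right)
--                 changed = True
--             if right in top_generation and left not in top_generation:
--                 top_generation.add(left)
--                 changed = True
--
--             if left in second_generation and right not in second_generation:
--                 second_generation.add(right)
--                 changed = True
--             if right in second_generation and left not in second_generation:
--                 second_generation.add(left)
--                 changed = True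
--
--             if left in third_generation and right not in third_generation:
--                 third_generation.add(right)
--                 changed = True
--             if right in third_generation and left not in third_generation:
--                 third_generation.add(left)
--                 changed = True
--
--     # Resolve overlaps with explicit row priority: top -> second -> third.
--     second_generation -= top_generation
--     third_generation -= top_generation
--     third_generation -= second_generation
--
--     # Any remaining linked people go in second row to keep the tree compact.
--     remaining = scope - top_generation - second_generation - third_generation
--     second_generation.update(remaining)
--
--     levels: dict[str, int] = {}
--     for name in top_generation:
--         levels[name] = 0
--     for name in second_generation:
--         levels[name] = 1
--     for name in third_generation:
--         levels[name] = 2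
--
--     return levels
-- ===== SOURCE B (Python) =====
-- def build_global_tree_levels(
--     scope: set[str],
--     relation_map: dict[tuple[str, str, str], set[str]],
-- ) -> dict[str, int]:
--     # Fixed 3-row family tree: one BFS per row over a partner adjacency index
--     # instead of repeated rescans of the pair list.
--     parent_edges: list[tuple[str, str]] = []
--     adjacency: dict[str, list[str]] = {}
--     for (source, target, relation), evidence_docs in relation_map.items():
--         if not evidence_docs or source not in scope or target not in scope:
--             continue
--         if relation == "parent_of":
--             parent_edges.append((source, target))
--         elif relation == "partner_of":
--             for a, b in ((source, target), (target, source)):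
--                 adjacency.setdefault(a, []).append(b)
--
--     parents = {p for p, _ in parent_edges}
--     children = {c for _, c in parent_edges}
--     roots = (parents - children) or parents
--     gen2 = {c for p, c in parent_edges if p in roots}
--     gen3 = {c for p, c in parent_edges if p in gen2}
--
--     def reach(seeds: set[str]) -> set[str]:
--         # breadth-first closure of the seed row under partner links
--         seen = set(seeds)
--         queue = list(seeds)
--         while queue:
--             node = queue.pop(0)
--             for neighbour in adjacency.get(node, []):
--                 if neighbour not in seen:
--                     seen.add(neighbour)
--                     queue.append(neighbour)
--         return seen
--
--     top = reach(roots)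
--     second = reach(gen2)
--     third = reach(gen3)
--
--     levels: dict[str, int] = {}
--     for name in sorted(top):
--         levels[name] = 0
--     for name in sorted((second - top) | (scope - top - second - third)):
--         levels[name] = 1
--     for name in sorted(third - top - second):
--         levels[name] = 2
--     return levels
-- ===== Notes on version B (the rewrite author's own statement) =====
-- stated objective: alternative
-- what changed: B replaces A's repeated full rescans of the partner-pair list (a changed-flag fixpoint loop over three row sets) by a partner adjacency dict built in the first pass and one breadth-first traversal per row, assigning levels by set algebra and emitting the dict in sorted order (Python set iteration order is unspecified and the output dict is compared ignoring order).
import Mathlib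
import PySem

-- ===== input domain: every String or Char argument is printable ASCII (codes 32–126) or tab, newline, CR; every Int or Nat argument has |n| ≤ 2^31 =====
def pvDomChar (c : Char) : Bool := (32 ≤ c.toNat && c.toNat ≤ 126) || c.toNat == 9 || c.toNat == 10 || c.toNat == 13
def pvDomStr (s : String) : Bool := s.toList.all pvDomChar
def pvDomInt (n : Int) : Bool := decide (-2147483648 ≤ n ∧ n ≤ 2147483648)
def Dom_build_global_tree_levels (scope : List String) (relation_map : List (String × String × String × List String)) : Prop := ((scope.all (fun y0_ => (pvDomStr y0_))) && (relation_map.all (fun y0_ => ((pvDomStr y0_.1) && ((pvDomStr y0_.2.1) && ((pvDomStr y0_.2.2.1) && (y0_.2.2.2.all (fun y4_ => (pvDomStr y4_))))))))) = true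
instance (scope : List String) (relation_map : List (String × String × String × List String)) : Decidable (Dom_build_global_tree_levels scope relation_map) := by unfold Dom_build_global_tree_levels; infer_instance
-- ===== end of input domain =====

-- B replaces A's repeated full rescans of the partner-pair list (a changed-flag
-- fixpoint loop) by one breadth-first closure per row over a partner adjacency index
-- (objective: alternative).  Python set/dict ITERATION order is unspecified
-- (hash-based) and the output dict is compared ignoring order, so BOTH ports realize
-- the final iteration over the three row sets in sorted order, a deterministic choice.
-- Neither Python mutates its arguments.

-- ===== PORT A =====
-- one item of 'for (source, target, relation), evidence_docs in relation_map.items()'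
def pvAStep (scope : List String) (acc : List (String × String) × List (String × String))
    (e : String × String × String × List String) : List (String × String) × List (String × String) :=
  if e.2.2.2.isEmpty || !scope.contains e.1 || !scope.contains e.2.1 then acc
  else if e.2.2.1 == "parent_of" then (acc.1 ++ [(e.1, e.2.1)], acc.2)
  else if e.2.2.1 == "partner_of" then (acc.1, acc.2 ++ [(e.1, e.2.1)])
  else acc

-- the body of 'for left, right in partner_pairs' (six sequential conditional updates)
def pvASix (st : (PySem.Set String × PySem.Set String × PySem.Set String) × Bool)
    (pr : String × String) : (PySem.Set String × PySem.Set String × PySem.Set String) × Bool :=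
  let l := pr.1
  let r := pr.2
  let tc1 := if st.1.1.contains l && !st.1.1.contains r then (PySem.Set.add st.1.1 r, true) else (st.1.1, st.2)
  let tc2 := if tc1.1.contains r && !tc1.1.contains l then (PySem.Set.add tc1.1 l, true) else tc1
  let sc1 := if st.1.2.1.contains l && !st.1.2.1.contains r then (PySem.Set.add st.1.2.1 r, true) else (st.1.2.1, tc2.2)
  let sc2 := if sc1.1.contains r && !sc1.1.contains l then (PySem.Set.add sc1.1 l, true) else sc1
  let hc1 := if st.1.2.2.contains l && !st.1.2.2.contains r then (PySem.Set.add st.1.2.2 r, true) else (st.1.2.2, sc2.2)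
  let hc2 := if hc1.1.contains r && !hc1.1.contains l then (PySem.Set.add hc1.1 l, true) else hc1
  ((tc2.1, sc2.1, hc2.1), hc2.2)

-- 'changed = True; while changed: changed = False; for …' — the fuel only guards totality;
-- 2·|pairs|+1 passes always reach the fixpoint (each pass of the while body either changes
-- nothing, ending the loop, or appends at least one of the ≤ 2·|pairs| pair endpoints)
def pvALoop (pairs : List (String × String)) :
    Nat → PySem.Set String × PySem.Set String × PySem.Set String →
    PySem.Set String × PySem.Set String × PySem.Set String
  | 0, st => st
  | fuel + 1, st =>
    let st' := pairs.foldl pvASix (st, false)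
    if st'.2 then pvALoop pairs fuel st'.1 else st'.1

def build_global_tree_levels (scope : List String) (relation_map : List (String × String × String × List String)) : List (String × Int) :=
  let ep := relation_map.foldl (pvAStep scope) ([], [])
  let parent_edges := ep.1
  let partner_pairs := ep.2
  let children_by_parent := parent_edges.foldl
    (fun d pc => d.modify pc.1 PySem.Set.empty (fun s => PySem.Set.add s pc.2)) PySem.Dict.empty
  let parents_by_child := parent_edges.foldl
    (fun d pc => d.modify pc.2 PySem.Set.empty (fun s => PySem.Set.add s pc.1)) PySem.Dict.empty
  let parent_nodes := PySem.Set.ofList children_by_parent.keys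
  let child_nodes := PySem.Set.ofList parents_by_child.keys
  let top_gen0 := PySem.Set.ofList (parent_nodes.filter (fun n => !child_nodes.contains n))
  let top_gen := if top_gen0.isEmpty then PySem.Set.ofList parent_nodes else top_gen0
  let second_gen := top_gen.foldl
    (fun s g => PySem.Set.update s (children_by_parent.getD g PySem.Set.empty)) PySem.Set.empty
  let third_gen := second_gen.foldl
    (fun s p => PySem.Set.update s (children_by_parent.getD p PySem.Set.empty)) PySem.Set.empty
  let fin := pvALoop partner_pairs (2 * partner_pairs.length + 1) (top_gen, second_gen, third_gen)
  let top := fin.1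
  let sec2 := PySem.Set.diff fin.2.1 top
  let thr2 := PySem.Set.diff (PySem.Set.diff fin.2.2 top) sec2
  let remaining := PySem.Set.diff (PySem.Set.diff (PySem.Set.diff scope top) sec2) thr2
  let sec3 := PySem.Set.update sec2 remaining
  -- the three final 'for name in <set>' loops iterate hash-ordered Python sets; this port
  -- realizes that unspecified order as sorted order (the output dict ignores order)
  let d1 := (PySem.List.sorted top (fun x => x) false).foldl (fun d n => d.insert n (0 : Int)) PySem.Dict.empty
  let d2 := (PySem.List.sorted sec3 (fun x => x) false).foldl (fun d n => d.insert n (1 : Int)) d1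
  let d3 := (PySem.List.sorted thr2 (fun x => x) false).foldl (fun d n => d.insert n (2 : Int)) d2
  d3.items

-- ===== PORT B =====
-- one item of B's loop over relation_map.items(): collect a parent edge, or index a
-- partner pair in the adjacency dict in both directions (setdefault+append = modify)
def pvBStep (scope : List String) (acc : List (String × String) × PySem.Dict String (List String))
    (e : String × String × String × List String) : List (String × String) × PySem.Dict String (List String) :=
  if e.2.2.2.isEmpty || !scope.contains e.1 || !scope.contains e.2.1 then acc
  else if e.2.2.1 == "parent_of" then (acc.1 ++ [(e.1, e.2.1)], acc.2)
  else if e.2.2.1 == "partner_of" then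
    (acc.1, [(e.1, e.2.1), (e.2.1, e.1)].foldl (fun d ab => d.modify ab.1 [] (fun v => v ++ [ab.2])) acc.2)
  else acc

-- 'while queue: node = queue.pop(0); for m in adjacency.get(node, []): …' — the fuel only
-- guards totality (each iteration pops one queue element; every element is enqueued at most
-- once, so |seeds| + Σ|adjacency values| + 1 iterations always drain the queue)
def pvBFS (adj : PySem.Dict String (List String)) :
    Nat → PySem.Set String → List String → PySem.Set String
  | 0, seen, _ => seen
  | _ + 1, seen, [] => seen
  | fuel + 1, seen, node :: queue =>
    let st := (adj.getD node []).foldl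
      (fun (p : PySem.Set String × List String) m =>
        if p.1.contains m then p else (p.1 ++ [m], p.2 ++ [m])) (seen, queue)
    pvBFS adj fuel st.1 st.2

def pvReach (adj : PySem.Dict String (List String)) (seeds : PySem.Set String) : PySem.Set String :=
  pvBFS adj (seeds.length + (adj.values.map List.length).sum + 1) seeds seeds

def build_global_tree_levels_alt (scope : List String) (relation_map : List (String × String × String × List String)) : List (String × Int) :=
  let ea := relation_map.foldl (pvBStep scope) ([], PySem.Dict.empty)
  let parent_edges := ea.1
  let adjacency := ea.2
  let parents := PySem.Set.ofList (parent_edges.map (fun pc => pc.1))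
  let children := PySem.Set.ofList (parent_edges.map (fun pc => pc.2))
  let roots0 := PySem.Set.diff parents children
  let roots := if roots0.isEmpty then parents else roots0
  let gen2 := PySem.Set.ofList ((parent_edges.filter (fun pc => roots.contains pc.1)).map (fun pc => pc.2))
  let gen3 := PySem.Set.ofList ((parent_edges.filter (fun pc => gen2.contains pc.1)).map (fun pc => pc.2))
  let top := pvReach adjacency roots
  let second := pvReach adjacency gen2
  let third := pvReach adjacency gen3
  let lvl1 := PySem.Set.union (PySem.Set.diff second top)
    (PySem.Set.diff (PySem.Set.diff (PySem.Set.diff scope top) second) third)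
  let lvl2 := PySem.Set.diff (PySem.Set.diff third top) second
  let d1 := (PySem.List.sorted top (fun x => x) false).foldl (fun d n => d.insert n (0 : Int)) PySem.Dict.empty
  let d2 := (PySem.List.sorted lvl1 (fun x => x) false).foldl (fun d n => d.insert n (1 : Int)) d1
  let d3 := (PySem.List.sorted lvl2 (fun x => x) false).foldl (fun d n => d.insert n (2 : Int)) d2
  d3.items

-- ===== PRECONDITION & SPEC =====
def Spec_build_global_tree_levels (scope : List String) (relation_map : List (String × String × String × List String)) (out : List (String × Int)) : Prop := out = build_global_tree_levels_alt scope relation_map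
instance (scope : List String) (relation_map : List (String × String × String × List String)) (out : List (String × Int)) : Decidable (Spec_build_global_tree_levels scope relation_map out) := by unfold Spec_build_global_tree_levels; infer_instance

-- ===== CLAIM (what is proved, stated in full; the proofs are below) =====
def Claim_equal_build_global_tree_levels : Prop := ∀ (scope : List String) (relation_map : List (String × String × String × List String)), Dom_build_global_tree_levels scope relation_map → Spec_build_global_tree_levels scope relation_map (build_global_tree_levels scope relation_map)

-- ===== LEMMAS AND PROOFS =====

-- the canonical single-set sweep A's three-set pass reduces to
def pvStep1 (t : PySem.Set String) (pr : String × String) : PySem.Set String :=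
  if t.contains pr.1 && !t.contains pr.2 then t ++ [pr.2]
  else if t.contains pr.2 && !t.contains pr.1 then t ++ [pr.1]
  else t

def pvSw (pairs : List (String × String)) (t : PySem.Set String) : PySem.Set String :=
  pairs.foldl pvStep1 t

def pvCl (pairs : List (String × String)) : Nat → PySem.Set String → PySem.Set String
  | 0, t => t
  | fuel + 1, t =>
    let t' := pvSw pairs t
    if t'.length = t.length then t' else pvCl pairs fuel t'

-- the partner relation and reachability from a seed row under it
def pvE (pp : List (String × String)) (a b : String) : Prop := (a, b) ∈ pp ∨ (b, a) ∈ pp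

def pvR (pp : List (String × String)) (seeds : List String) (x : String) : Prop :=
  ∃ s ∈ seeds, Relation.ReflTransGen (pvE pp) s x


-- ---- generic prefix / nodup facts about the sweep ----
theorem pvStep1_prefix (t : PySem.Set String) (pr : String × String) : t <+: pvStep1 t pr := by
  unfold pvStep1; split_ifs <;> simp

theorem pvSw_prefix (pairs : List (String × String)) (t : PySem.Set String) : t <+: pvSw pairs t := by
  induction pairs generalizing t with
  | nil => simp [pvSw]
  | cons pr rest ih =>
    exact (pvStep1_prefix t pr).trans (ih (pvStep1 t pr))

theorem pvSw_stable (pairs : List (String × String)) (t : PySem.Set String)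
    (h : (pvSw pairs t).length = t.length) : pvSw pairs t = t := by
  exact ((pvSw_prefix pairs t).eq_of_length h.symm).symm

theorem pvCl_fix (pairs : List (String × String)) (fuel : Nat) (t : PySem.Set String)
    (h : pvSw pairs t = t) : pvCl pairs fuel t = t := by
  induction fuel with
  | zero => rfl
  | succ f ih => simp [pvCl, h]

theorem pvCl_succ (pairs : List (String × String)) (fuel : Nat) (t : PySem.Set String) :
    pvCl pairs (fuel + 1) t = pvCl pairs fuel (pvSw pairs t) := by
  show (if (pvSw pairs t).length = t.length then pvSw pairs t else pvCl pairs fuel (pvSw pairs t)) = _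
  split_ifs with h
  · rw [pvSw_stable pairs t h, pvCl_fix]
    rw [pvSw_stable pairs t h]
  · rfl

theorem pvCl_prefix (pairs : List (String × String)) (fuel : Nat) (t : PySem.Set String) :
    t <+: pvCl pairs fuel t := by
  induction fuel generalizing t with
  | zero => exact List.prefix_refl t
  | succ f ih =>
    rw [pvCl_succ]
    exact (pvSw_prefix pairs t).trans (ih (pvSw pairs t))

theorem pvStep1_nodup (t : PySem.Set String) (pr : String × String) (h : t.Nodup) :
    (pvStep1 t pr).Nodup := by
  unfold pvStep1
  split_ifs with h1 h2
  · simp [List.nodup_append, h]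
    simp at h1
    exact fun a ha heq => h1.2 (heq ▸ ha)
  · simp [List.nodup_append, h]
    simp at h2
    exact fun a ha heq => h2.2 (heq ▸ ha)
  · exact h

theorem pvSw_nodup (pairs : List (String × String)) (t : PySem.Set String) (h : t.Nodup) :
    (pvSw pairs t).Nodup := by
  induction pairs generalizing t with
  | nil => exact h
  | cons pr rest ih => exact ih _ (pvStep1_nodup t pr h)

theorem pvCl_nodup (pairs : List (String × String)) (fuel : Nat) (t : PySem.Set String)
    (h : t.Nodup) : (pvCl pairs fuel t).Nodup := by
  induction fuel generalizing t with
  | zero => exact h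
  | succ f ih =>
    rw [pvCl_succ]
    exact ih _ (pvSw_nodup pairs t h)

theorem pvNodupSubLen (t u : List String) (h1 : t.Nodup) (h2 : ∀ x ∈ t, x ∈ u) :
    t.length ≤ u.length :=
  (List.subperm_of_subset h1 h2).length_le

-- ---- A's three-set pass is the canonical sweep on each set ----
theorem pvTwo (t : PySem.Set String) (l r : String) (c : Bool) :
    (let tc1 := if t.contains l && !t.contains r then (PySem.Set.add t r, true) else (t, c);
     if tc1.1.contains r && !tc1.1.contains l then (PySem.Set.add tc1.1 l, true) else tc1)
    = (pvStep1 t (l, r), c || !((pvStep1 t (l, r)).length == t.length)) := by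
  by_cases hl : l ∈ t <;> by_cases hr : r ∈ t <;>
    simp [pvStep1, PySem.Set.add, hl, hr]

theorem pvASix_eq (t s h : PySem.Set String) (c : Bool) (pr : String × String) :
    pvASix ((t, s, h), c) pr =
      ((pvStep1 t pr, pvStep1 s pr, pvStep1 h pr),
        ((c || !((pvStep1 t pr).length == t.length)) || !((pvStep1 s pr).length == s.length)) ||
          !((pvStep1 h pr).length == h.length)) := by
  show (let tc2 := (let tc1 := if t.contains pr.1 && !t.contains pr.2 then (PySem.Set.add t pr.2, true) else (t, c);
          if tc1.1.contains pr.2 && !tc1.1.contains pr.1 then (PySem.Set.add tc1.1 pr.1, true) else tc1);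
        let sc2 := (let sc1 := if s.contains pr.1 && !s.contains pr.2 then (PySem.Set.add s pr.2, true) else (s, tc2.2);
          if sc1.1.contains pr.2 && !sc1.1.contains pr.1 then (PySem.Set.add sc1.1 pr.1, true) else sc1);
        let hc2 := (let hc1 := if h.contains pr.1 && !h.contains pr.2 then (PySem.Set.add h pr.2, true) else (h, sc2.2);
          if hc1.1.contains pr.2 && !hc1.1.contains pr.1 then (PySem.Set.add hc1.1 pr.1, true) else hc1);
        ((tc2.1, sc2.1, hc2.1), hc2.2)) = _
  simp only [pvTwo]

theorem pvStep1_len_le (t : PySem.Set String) (pr : String × String) :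
    t.length ≤ (pvStep1 t pr).length :=
  (pvStep1_prefix t pr).length_le

theorem pvBeqComb (a b c : Nat) (h1 : a ≤ b) (h2 : b ≤ c) :
    ((!(b == a)) || (!(c == b))) = (!(c == a)) := by
  by_cases e1 : b = a
  · subst e1; simp
  · by_cases e2 : c = b
    · subst e2; simp
    · have e3 : c ≠ a := by omega
      rw [show (b == a) = false from by simpa using e1,
          show (c == b) = false from by simpa using e2,
          show (c == a) = false from by simpa using e3]
      rfl

theorem pvAPass_eq (pairs : List (String × String)) (t s h : PySem.Set String) (c : Bool) :
    pairs.foldl pvASix ((t, s, h), c) =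
      ((pvSw pairs t, pvSw pairs s, pvSw pairs h),
        ((c || !((pvSw pairs t).length == t.length)) || !((pvSw pairs s).length == s.length)) ||
          !((pvSw pairs h).length == h.length)) := by
  induction pairs generalizing t s h c with
  | nil =>
    show ((t, s, h), c) = _
    simp [pvSw]
  | cons pr rest ih =>
    show rest.foldl pvASix (pvASix ((t, s, h), c) pr) = _
    rw [pvASix_eq, ih]
    have ht := pvBeqComb _ _ _ (pvStep1_len_le t pr) (pvSw_prefix rest (pvStep1 t pr)).length_le
    have hs := pvBeqComb _ _ _ (pvStep1_len_le s pr) (pvSw_prefix rest (pvStep1 s pr)).length_le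
    have hh := pvBeqComb _ _ _ (pvStep1_len_le h pr) (pvSw_prefix rest (pvStep1 h pr)).length_le
    simp only [pvSw, List.foldl_cons] at ht hs hh ⊢
    rw [← ht, ← hs, ← hh]
    refine congrArg _ ?_
    ac_rfl

theorem pvALoop_eq (pairs : List (String × String)) (fuel : Nat) (t s h : PySem.Set String) :
    pvALoop pairs fuel (t, s, h) = (pvCl pairs fuel t, pvCl pairs fuel s, pvCl pairs fuel h) := by
  induction fuel generalizing t s h with
  | zero => rfl
  | succ f ih =>
    show (let st' := pairs.foldl pvASix (((t, s, h)), false)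
          if st'.2 then pvALoop pairs f st'.1 else st'.1) = _
    rw [pvAPass_eq]
    cases hbe : (((false || !((pvSw pairs t).length == t.length)) || !((pvSw pairs s).length == s.length)) || !((pvSw pairs h).length == h.length)) with
    | true =>
      simp only [if_true]
      rw [ih, pvCl_succ, pvCl_succ, pvCl_succ]
    | false =>
      simp only [Bool.false_eq_true, if_false]
      have hbe2 := hbe
      simp only [Bool.or_eq_false_iff, Bool.not_eq_false', beq_iff_eq, Bool.false_or] at hbe2
      obtain ⟨⟨h1, h2⟩, h3⟩ := hbe2
      have e1 := pvSw_stable pairs t h1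
      have e2 := pvSw_stable pairs s h2
      have e3 := pvSw_stable pairs h h3
      rw [pvCl_succ, pvCl_succ, pvCl_succ, e1, e2, e3,
          pvCl_fix pairs f t e1, pvCl_fix pairs f s e2, pvCl_fix pairs f h e3]

-- ---- reachability basics ----
theorem pvR_of_mem (pp : List (String × String)) (seeds : List String) (x : String)
    (h : x ∈ seeds) : pvR pp seeds x :=
  ⟨x, h, Relation.ReflTransGen.refl⟩

theorem pvR_step (pp : List (String × String)) (seeds : List String) (x y : String)
    (h : pvR pp seeds x) (e : pvE pp x y) : pvR pp seeds y := by
  obtain ⟨s, hs, hr⟩ := h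
  exact ⟨s, hs, hr.tail e⟩

theorem pvR_subset_closed (pp : List (String × String)) (seeds : List String) (T : List String)
    (hseed : ∀ s ∈ seeds, s ∈ T) (hcl : ∀ x y, x ∈ T → pvE pp x y → y ∈ T) :
    ∀ x, pvR pp seeds x → x ∈ T := by
  intro x hx
  obtain ⟨s, hs, hr⟩ := hx
  induction hr with
  | refl => exact hseed s hs
  | tail _ e ih => exact hcl _ _ ih e

theorem pvR_congr (pp : List (String × String)) (s1 s2 : List String)
    (h : ∀ s, s ∈ s1 ↔ s ∈ s2) (x : String) : pvR pp s1 x ↔ pvR pp s2 x := by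
  constructor
  · rintro ⟨s, hs, hr⟩
    exact ⟨s, (h s).mp hs, hr⟩
  · rintro ⟨s, hs, hr⟩
    exact ⟨s, (h s).mpr hs, hr⟩

-- ---- everything in the sweep closure is reachable ----
theorem pvStep1_mem_reach (pp : List (String × String)) (seeds : List String)
    (t : PySem.Set String) (pr : String × String) (hpr : pr ∈ pp)
    (ht : ∀ x ∈ t, pvR pp seeds x) : ∀ x ∈ pvStep1 t pr, pvR pp seeds x := by
  intro x hx
  unfold pvStep1 at hx
  split_ifs at hx with h1 h2
  · simp only [Bool.and_eq_true, PySem.Set.contains_iff] at h1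
    rcases List.mem_append.mp hx with h | h
    · exact ht x h
    · simp only [List.mem_singleton] at h
      subst h
      exact pvR_step pp seeds pr.1 pr.2 (ht pr.1 h1.1) (Or.inl (by simpa using hpr))
  · simp only [Bool.and_eq_true, PySem.Set.contains_iff] at h2
    rcases List.mem_append.mp hx with h | h
    · exact ht x h
    · simp only [List.mem_singleton] at h
      subst h
      exact pvR_step pp seeds pr.2 pr.1 (ht pr.2 h2.1) (Or.inr (by simpa using hpr))
  · exact ht x hx

theorem pvSw_mem_reach (pp : List (String × String)) (seeds : List String)
    (pairs : List (String × String)) (hsub : ∀ q ∈ pairs, q ∈ pp)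
    (t : PySem.Set String) (ht : ∀ x ∈ t, pvR pp seeds x) :
    ∀ x ∈ pvSw pairs t, pvR pp seeds x := by
  induction pairs generalizing t with
  | nil => exact ht
  | cons pr rest ih =>
    exact ih (fun q hq => hsub q (List.mem_cons_of_mem pr hq)) _
      (pvStep1_mem_reach pp seeds t pr (hsub pr List.mem_cons_self) ht)

theorem pvCl_mem_reach (pp : List (String × String)) (seeds : List String) (fuel : Nat)
    (t : PySem.Set String) (ht : ∀ x ∈ t, pvR pp seeds x) :
    ∀ x ∈ pvCl pp fuel t, pvR pp seeds x := by
  induction fuel generalizing t with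
  | zero => exact ht
  | succ f ih =>
    rw [pvCl_succ]
    exact ih _ (pvSw_mem_reach pp seeds pp (fun q hq => hq) t ht)

-- ---- the sweep closure reaches a fixpoint within its fuel ----
theorem pvStep1_subU (U : List String) (t : PySem.Set String) (pr : String × String)
    (hpr : pr.1 ∈ U ∧ pr.2 ∈ U) (ht : ∀ x ∈ t, x ∈ U) : ∀ x ∈ pvStep1 t pr, x ∈ U := by
  intro x hx
  unfold pvStep1 at hx
  split_ifs at hx with h1 h2
  · rcases List.mem_append.mp hx with h | h
    · exact ht x h
    · simp only [List.mem_singleton] at h; exact h ▸ hpr.2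
  · rcases List.mem_append.mp hx with h | h
    · exact ht x h
    · simp only [List.mem_singleton] at h; exact h ▸ hpr.1
  · exact ht x hx

theorem pvSw_subU (U : List String) (pairs : List (String × String))
    (hU : ∀ q ∈ pairs, q.1 ∈ U ∧ q.2 ∈ U) (t : PySem.Set String) (ht : ∀ x ∈ t, x ∈ U) :
    ∀ x ∈ pvSw pairs t, x ∈ U := by
  induction pairs generalizing t with
  | nil => exact ht
  | cons pr rest ih =>
    exact ih (fun q hq => hU q (List.mem_cons_of_mem pr hq)) _
      (pvStep1_subU U t pr (hU pr List.mem_cons_self) ht)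

theorem pvCl_fixpoint (pairs : List (String × String)) (U : List String)
    (hU : ∀ q ∈ pairs, q.1 ∈ U ∧ q.2 ∈ U) :
    ∀ (fuel : Nat) (t : PySem.Set String), t.Nodup → (∀ x ∈ t, x ∈ U) →
    U.length + 1 ≤ fuel + t.length →
    pvSw pairs (pvCl pairs fuel t) = pvCl pairs fuel t := by
  intro fuel
  induction fuel with
  | zero =>
    intro t hnd ht hlen
    exact absurd (pvNodupSubLen t U hnd ht) (by omega)
  | succ f ih =>
    intro t hnd ht hlen
    by_cases hfix : (pvSw pairs t).length = t.length
    · have he := pvSw_stable pairs t hfix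
      rw [pvCl_fix pairs (f + 1) t he, he]
    · have hstep : pvCl pairs (f + 1) t = pvCl pairs f (pvSw pairs t) := pvCl_succ pairs f t
      rw [hstep]
      have hlt : t.length < (pvSw pairs t).length :=
        lt_of_le_of_ne (pvSw_prefix pairs t).length_le (fun h => hfix h.symm)
      exact ih (pvSw pairs t) (pvSw_nodup pairs t hnd) (pvSw_subU U pairs hU t ht)
        (by omega)

-- ---- a fixpoint of the sweep is closed under the partner relation ----
theorem pvSw_fix_each (pairs : List (String × String)) :
    ∀ (t : PySem.Set String), pvSw pairs t = t → ∀ pr ∈ pairs, pvStep1 t pr = t := by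
  induction pairs with
  | nil => intro t h pr hpr; cases hpr
  | cons q rest ih =>
    intro t h pr hpr
    have hsw : pvSw rest (pvStep1 t q) = t := h
    have hpre1 : t <+: pvStep1 t q := pvStep1_prefix t q
    have hpre2 : pvStep1 t q <+: t := by
      have := pvSw_prefix rest (pvStep1 t q)
      rwa [hsw] at this
    have heq : pvStep1 t q = t :=
      hpre2.eq_of_length (Nat.le_antisymm hpre2.length_le hpre1.length_le)
    rcases List.mem_cons.mp hpr with h1 | h1
    · exact h1 ▸ heq
    · refine ih t ?_ pr h1
      rw [heq] at hsw
      exact hsw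

theorem pvStep1_closed (t : PySem.Set String) (pr : String × String)
    (h : pvStep1 t pr = t) : (pr.1 ∈ t → pr.2 ∈ t) ∧ (pr.2 ∈ t → pr.1 ∈ t) := by
  constructor
  · intro h1
    by_contra h2
    have : pvStep1 t pr = t ++ [pr.2] := by
      unfold pvStep1
      rw [if_pos (by simp [h1, h2])]
    rw [h] at this
    simpa using congrArg List.length this
  · intro h1
    by_contra h2
    have : pvStep1 t pr = t ++ [pr.1] := by
      unfold pvStep1
      rw [if_neg (by simp [h2]), if_pos (by simp [h1, h2])]
    rw [h] at this
    simpa using congrArg List.length this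

theorem pvFlatLen (pp : List (String × String)) :
    (pp.flatMap (fun pr => [pr.1, pr.2])).length = 2 * pp.length := by
  induction pp with
  | nil => rfl
  | cons pr rest ih => simp [ih]; omega

-- A's closure of a seed row holds exactly the row members reachable over partner links
theorem pvCl_mem_iff (pp : List (String × String)) (seeds : PySem.Set String)
    (hnd : seeds.Nodup) (x : String) :
    x ∈ pvCl pp (2 * pp.length + 1) seeds ↔ pvR pp seeds x := by
  constructor
  · exact pvCl_mem_reach pp seeds _ seeds (fun y hy => pvR_of_mem pp seeds y hy) x
  · intro hr
    have hU : ∀ q ∈ pp, q.1 ∈ (seeds ++ pp.flatMap (fun pr => [pr.1, pr.2])) ∧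
        q.2 ∈ (seeds ++ pp.flatMap (fun pr => [pr.1, pr.2])) := by
      intro q hq
      exact ⟨List.mem_append_right _ (List.mem_flatMap.mpr ⟨q, hq, by simp⟩),
             List.mem_append_right _ (List.mem_flatMap.mpr ⟨q, hq, by simp⟩)⟩
    have hfix := pvCl_fixpoint pp _ hU (2 * pp.length + 1) seeds hnd
      (fun y hy => List.mem_append_left _ hy)
      (by rw [List.length_append, pvFlatLen]; omega)
    refine pvR_subset_closed pp seeds _ ?_ ?_ x hr
    · intro s hs
      exact (pvCl_prefix pp _ seeds).subset hs
    · intro a b ha he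
      rcases he with h | h
      · exact (pvStep1_closed _ (a, b) (pvSw_fix_each pp _ hfix (a, b) h)).1 ha
      · exact (pvStep1_closed _ (b, a) (pvSw_fix_each pp _ hfix (b, a) h)).2 ha

-- ---- the two relation_map loops produce the same filtered edges ----
theorem pvAStep_foldl (scope : List String) (rm : List (String × String × String × List String))
    (a b : List (String × String)) :
    rm.foldl (pvAStep scope) (a, b) =
      (a ++ (rm.filter (fun e => (!e.2.2.2.isEmpty && scope.contains e.1 && scope.contains e.2.1) && (e.2.2.1 == "parent_of"))).map (fun e => (e.1, e.2.1)),
       b ++ (rm.filter (fun e => (!e.2.2.2.isEmpty && scope.contains e.1 && scope.contains e.2.1) && (e.2.2.1 == "partner_of"))).map (fun e => (e.1, e.2.1))) := by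
  induction rm generalizing a b with
  | nil => simp
  | cons e rest ih =>
    show rest.foldl (pvAStep scope)
        (if e.2.2.2.isEmpty || !scope.contains e.1 || !scope.contains e.2.1 then (a, b)
         else if e.2.2.1 == "parent_of" then (a ++ [(e.1, e.2.1)], b)
         else if e.2.2.1 == "partner_of" then (a, b ++ [(e.1, e.2.1)])
         else (a, b)) = _
    by_cases h1 : e.2.2.2 = [] <;> by_cases h2 : e.1 ∈ scope <;>
      by_cases h3 : e.2.1 ∈ scope <;> by_cases h4 : e.2.2.1 = "parent_of" <;>
      by_cases h5 : e.2.2.1 = "partner_of" <;>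
      first
        | exact absurd (h4.symm.trans h5) (by decide)
        | simp [h1, h2, h3, h4, h5, ih, List.isEmpty_iff]

theorem pvEdges_eq (scope : List String) (rm : List (String × String × String × List String)) :
    rm.foldl (pvAStep scope) ([], []) =
      ((rm.filter (fun e => (!e.2.2.2.isEmpty && scope.contains e.1 && scope.contains e.2.1) && (e.2.2.1 == "parent_of"))).map (fun e => (e.1, e.2.1)),
       (rm.filter (fun e => (!e.2.2.2.isEmpty && scope.contains e.1 && scope.contains e.2.1) && (e.2.2.1 == "partner_of"))).map (fun e => (e.1, e.2.1))) := by
  simpa using pvAStep_foldl scope rm [] []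

theorem pvBStep_foldl (scope : List String) (rm : List (String × String × String × List String))
    (a : List (String × String)) (d : PySem.Dict String (List String)) :
    rm.foldl (pvBStep scope) (a, d) =
      (a ++ (rm.filter (fun e => (!e.2.2.2.isEmpty && scope.contains e.1 && scope.contains e.2.1) && (e.2.2.1 == "parent_of"))).map (fun e => (e.1, e.2.1)),
       (((rm.filter (fun e => (!e.2.2.2.isEmpty && scope.contains e.1 && scope.contains e.2.1) && (e.2.2.1 == "partner_of"))).map (fun e => (e.1, e.2.1))).flatMap
          (fun pr => [(pr.1, pr.2), (pr.2, pr.1)])).foldl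
         (fun d ab => d.modify ab.1 [] (fun v => v ++ [ab.2])) d) := by
  induction rm generalizing a d with
  | nil => simp
  | cons e rest ih =>
    show rest.foldl (pvBStep scope)
        (if e.2.2.2.isEmpty || !scope.contains e.1 || !scope.contains e.2.1 then (a, d)
         else if e.2.2.1 == "parent_of" then (a ++ [(e.1, e.2.1)], d)
         else if e.2.2.1 == "partner_of" then
           (a, [(e.1, e.2.1), (e.2.1, e.1)].foldl (fun d ab => d.modify ab.1 [] (fun v => v ++ [ab.2])) d)
         else (a, d)) = _
    by_cases h1 : e.2.2.2 = [] <;> by_cases h2 : e.1 ∈ scope <;>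
      by_cases h3 : e.2.1 ∈ scope <;> by_cases h4 : e.2.2.1 = "parent_of" <;>
      by_cases h5 : e.2.2.1 = "partner_of" <;>
      first
        | exact absurd (h4.symm.trans h5) (by decide)
        | simp [h1, h2, h3, h4, h5, ih, List.isEmpty_iff]

-- ---- B's adjacency dict holds exactly the partner neighbours ----
theorem pvAdj_getD (dir : List (String × String)) (n : String) :
    (dir.foldl (fun d ab => d.modify ab.1 [] (fun v => v ++ [ab.2])) PySem.Dict.empty).getD n []
      = (dir.filter (fun p => p.1 == n)).map (fun p => p.2) := by
  rw [PySem.Dict.getD_foldl_modify_append, PySem.Dict.getD_empty]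
  simp

theorem pvAdj_mem_iff (pp : List (String × String)) (n m : String) :
    m ∈ ((pp.flatMap (fun pr => [(pr.1, pr.2), (pr.2, pr.1)])).foldl
        (fun d ab => d.modify ab.1 [] (fun v => v ++ [ab.2])) PySem.Dict.empty).getD n []
      ↔ pvE pp n m := by
  rw [pvAdj_getD]
  simp only [List.mem_map, List.mem_filter, List.mem_flatMap, List.mem_cons,
    List.not_mem_nil, or_false, beq_iff_eq, pvE]
  constructor
  · rintro ⟨p, ⟨⟨pr, hpr, hp⟩, hn⟩, hm⟩
    rcases hp with hp | hp <;> subst hp <;> subst hn <;> subst hm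
    · exact Or.inl hpr
    · exact Or.inr hpr
  · rintro (h | h)
    · exact ⟨(n, m), ⟨⟨(n, m), h, Or.inl rfl⟩, rfl⟩, rfl⟩
    · exact ⟨(n, m), ⟨⟨(m, n), h, Or.inr rfl⟩, rfl⟩, rfl⟩

theorem pvGetD_sub_values (d : PySem.Dict String (List String)) (n x : String)
    (h : x ∈ d.getD n []) : x ∈ d.values.flatten := by
  rcases hg : d.get? n with _ | v
  · rw [PySem.Dict.getD_eq_get?_getD d n, hg] at h
    cases h
  · rw [PySem.Dict.getD_of_get?_eq_some d [] hg] at h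
    have hi : (n, v) ∈ d.items := by
      exact PySem.Dict.mem_items_of_get?_eq_some _ hg
    have hv : v ∈ d.values := List.mem_map.mpr ⟨(n, v), hi, rfl⟩
    exact List.mem_flatten.mpr ⟨v, hv, h⟩

-- ---- one BFS step: pop a node, append its unseen neighbours to seen and queue ----
theorem pvBFS_fold (ms : List String) :
    ∀ (seen : PySem.Set String) (rest : List String),
    ∃ new : List String,
      ms.foldl (fun (p : PySem.Set String × List String) m =>
        if p.1.contains m then p else (p.1 ++ [m], p.2 ++ [m])) (seen, rest)
        = (seen ++ new, rest ++ new)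
      ∧ new.Nodup ∧ (∀ m ∈ new, m ∈ ms ∧ m ∉ seen) ∧ (∀ m ∈ ms, m ∈ seen ++ new) := by
  induction ms with
  | nil =>
    intro seen rest
    exact ⟨[], by simp, List.nodup_nil, by simp, by simp⟩
  | cons m ms ih =>
    intro seen rest
    cases hc : PySem.Set.contains seen m with
    | true =>
      obtain ⟨new, heq, hnd, hprop, hall⟩ := ih seen rest
      refine ⟨new, ?_, hnd, ?_, ?_⟩
      · show ms.foldl _ (if seen.contains m then (seen, rest) else _) = _
        rw [hc, if_pos rfl]
        exact heq
      · exact fun x hx => ⟨List.mem_cons_of_mem m (hprop x hx).1, (hprop x hx).2⟩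
      · intro y hy
        rcases List.mem_cons.mp hy with h | h
        · subst h
          exact List.mem_append_left _ (by simpa using hc)
        · exact hall y h
    | false =>
      obtain ⟨new, heq, hnd, hprop, hall⟩ := ih (seen ++ [m]) (rest ++ [m])
      have hmns : m ∉ seen := by simpa using hc
      refine ⟨m :: new, ?_, ?_, ?_, ?_⟩
      · show ms.foldl _ (if seen.contains m then (seen, rest) else (seen ++ [m], rest ++ [m])) = _
        rw [hc]
        simp only [Bool.false_eq_true, if_false]
        rw [heq]
        simp
      · exact List.nodup_cons.mpr ⟨fun hmem => (hprop m hmem).2 (by simp), hnd⟩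
      · intro x hx
        rcases List.mem_cons.mp hx with h | h
        · subst h
          exact ⟨List.mem_cons_self, hmns⟩
        · have := hprop x h
          exact ⟨List.mem_cons_of_mem m this.1, fun hmem => this.2 (by simp [hmem])⟩
      · intro y hy
        rcases List.mem_cons.mp hy with h | h
        · subst h
          simp
        · have := hall y h
          simpa using this

-- ---- the BFS closure: everything it returns satisfies P, and it is adjacency-closed ----
theorem pvBFS_main (adj : PySem.Dict String (List String)) (P : String → Prop) (U : List String)
    (hPstep : ∀ x m, P x → m ∈ adj.getD x [] → P m)
    (hUadj : ∀ x m, m ∈ adj.getD x [] → m ∈ U) :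
    ∀ (fuel : Nat) (seen : PySem.Set String) (queue : List String),
    seen.Nodup → queue.Nodup → (∀ x ∈ queue, x ∈ seen) → (∀ x ∈ seen, x ∈ U) →
    (∀ x ∈ seen, P x) →
    (∀ x ∈ seen, x ∈ queue ∨ ∀ m ∈ adj.getD x [], m ∈ seen) →
    U.length + queue.length ≤ fuel + seen.length →
    (∀ x ∈ seen, x ∈ pvBFS adj fuel seen queue) ∧
    (pvBFS adj fuel seen queue).Nodup ∧
    (∀ x ∈ pvBFS adj fuel seen queue, P x) ∧
    (∀ x ∈ pvBFS adj fuel seen queue, ∀ m ∈ adj.getD x [], m ∈ pvBFS adj fuel seen queue) := by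
  intro fuel
  induction fuel with
  | zero =>
    intro seen queue hsnd hqnd hqs hsU hsP hinv hlen
    have hql : queue.length = 0 := by
      have := pvNodupSubLen seen U hsnd hsU
      omega
    have hq : queue = [] := List.eq_nil_of_length_eq_zero hql
    subst hq
    refine ⟨fun x hx => hx, hsnd, hsP, ?_⟩
    intro x hx m hm
    rcases hinv x hx with h | h
    · cases h
    · exact h m hm
  | succ f ih =>
    intro seen queue hsnd hqnd hqs hsU hsP hinv hlen
    cases queue with
    | nil =>
      refine ⟨fun x hx => hx, hsnd, hsP, ?_⟩
      intro x hx m hm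
      rcases hinv x hx with h | h
      · cases h
      · exact h m hm
    | cons node rest =>
      obtain ⟨new, heq, hndnew, hpropnew, hallms⟩ := pvBFS_fold (adj.getD node []) seen rest
      have hstep : pvBFS adj (f + 1) seen (node :: rest) = pvBFS adj f (seen ++ new) (rest ++ new) := by
        show pvBFS adj f ((adj.getD node []).foldl _ (seen, rest)).1
          ((adj.getD node []).foldl _ (seen, rest)).2 = _
        rw [heq]
      rw [hstep]
      have hnode : node ∈ seen := hqs node List.mem_cons_self
      have hrestq : ∀ x ∈ rest, x ∈ seen := fun x hx => hqs x (List.mem_cons_of_mem _ hx)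
      have hdisj : ∀ x ∈ new, x ∉ seen := fun x hx => (hpropnew x hx).2
      have hrestnd : rest.Nodup := (List.nodup_cons.mp hqnd).2
      have hnodenr : node ∉ rest := (List.nodup_cons.mp hqnd).1
      have hmain := ih (seen ++ new) (rest ++ new)
        (List.nodup_append.mpr ⟨hsnd, hndnew, fun a ha b hb heq => hdisj b hb (heq ▸ ha)⟩)
        (List.nodup_append.mpr ⟨hrestnd, hndnew, fun a ha b hb heq => hdisj b hb (heq ▸ hrestq a ha)⟩)
        (fun x hx => by
          rcases List.mem_append.mp hx with h | h
          · exact List.mem_append_left _ (hrestq x h)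
          · exact List.mem_append_right _ h)
        (fun x hx => by
          rcases List.mem_append.mp hx with h | h
          · exact hsU x h
          · exact hUadj node x (hpropnew x h).1)
        (fun x hx => by
          rcases List.mem_append.mp hx with h | h
          · exact hsP x h
          · exact hPstep node x (hsP node hnode) (hpropnew x h).1)
        (fun x hx => by
          rcases List.mem_append.mp hx with h | h
          · rcases hinv x h with h2 | h2
            · rcases List.mem_cons.mp h2 with h3 | h3
              · subst h3
                exact Or.inr hallms
              · exact Or.inl (List.mem_append_left _ h3)
            · exact Or.inr (fun m hm => List.mem_append_left _ (h2 m hm))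
          · exact Or.inl (List.mem_append_right _ h))
        (by
          rw [List.length_append, List.length_append]
          have : (node :: rest).length = rest.length + 1 := by simp
          omega)
      obtain ⟨h1, h2, h3, h4⟩ := hmain
      exact ⟨fun x hx => h1 x (List.mem_append_left _ hx), h2, h3, h4⟩

-- B's BFS closure of a seed row holds exactly the row members reachable over partner links
theorem pvReach_spec (adj : PySem.Dict String (List String)) (pp : List (String × String))
    (seeds : PySem.Set String) (hnd : seeds.Nodup)
    (hadj : ∀ x m, m ∈ adj.getD x [] ↔ pvE pp x m) :
    (pvReach adj seeds).Nodup ∧ (∀ x, x ∈ pvReach adj seeds ↔ pvR pp seeds x) := by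
  have hmain := pvBFS_main adj (pvR pp seeds) (seeds ++ adj.values.flatten)
    (fun x m hx hm => pvR_step pp seeds x m hx ((hadj x m).mp hm))
    (fun x m hm => List.mem_append_right _ (pvGetD_sub_values adj x m hm))
    (seeds.length + (adj.values.map List.length).sum + 1) seeds seeds hnd hnd
    (fun x hx => hx)
    (fun x hx => List.mem_append_left _ hx)
    (fun x hx => pvR_of_mem pp seeds x hx)
    (fun x hx => Or.inl hx)
    (by rw [List.length_append, List.length_flatten]; omega)
  obtain ⟨h1, h2, h3, h4⟩ := hmain
  refine ⟨h2, fun x => ⟨h3 x, ?_⟩⟩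
  exact fun hr => pvR_subset_closed pp seeds _ h1
    (fun a b ha he => h4 a ha b ((hadj a b).mpr he)) x hr

-- ---- A's defaultdict(set) children lookups ----
theorem pvCbpGetD_aux (pe : List (String × String)) (g : String) (d : PySem.Dict String (PySem.Set String)) :
    (pe.foldl (fun d pc => d.modify pc.1 PySem.Set.empty (fun s => PySem.Set.add s pc.2)) d).getD g PySem.Set.empty
      = PySem.Set.update (d.getD g PySem.Set.empty) ((pe.filter (fun pc => pc.1 == g)).map (fun pc => pc.2)) := by
  induction pe generalizing d with
  | nil => simp [PySem.Set.update]
  | cons pc rest ih =>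
    show (rest.foldl _ (d.modify pc.1 PySem.Set.empty (fun s => PySem.Set.add s pc.2))).getD g PySem.Set.empty = _
    rw [ih]
    rw [PySem.Dict.getD_modify]
    by_cases h : pc.1 = g
    · simp [h, PySem.Set.update_cons]
    · have h' : ¬ g = pc.1 := fun e => h e.symm
      simp [h, h']

theorem pvCbpGetD (pe : List (String × String)) (g : String) :
    (pe.foldl (fun d pc => d.modify pc.1 PySem.Set.empty (fun s => PySem.Set.add s pc.2)) PySem.Dict.empty).getD g PySem.Set.empty
      = PySem.Set.ofList ((pe.filter (fun pc => pc.1 == g)).map (fun pc => pc.2)) := by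
  rw [pvCbpGetD_aux, PySem.Dict.getD_empty]
  exact PySem.Set.update_nil_left _

theorem pvUpdateOfList (s : PySem.Set String) (xs : List String) :
    PySem.Set.update s (PySem.Set.ofList xs) = PySem.Set.update s xs := by
  rw [PySem.Set.update_eq_append_filter, PySem.Set.update_eq_append_filter, PySem.Set.ofList_ofList]

-- A's 'for g in gen: acc.update(children[g])' loop = set of the flattened children lists
theorem pvFoldUpdate (kid : String → List String) (l : List String) (s : PySem.Set String) :
    l.foldl (fun s g => PySem.Set.update s (PySem.Set.ofList (kid g))) s
      = PySem.Set.update s (l.flatMap kid) := by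
  induction l generalizing s with
  | nil => rfl
  | cons g rest ih =>
    show rest.foldl _ (PySem.Set.update s (PySem.Set.ofList (kid g))) = _
    rw [ih, pvUpdateOfList, List.flatMap_cons, PySem.Set.update_append]

-- ---- the two programs agree from the filtered edges onward ----
-- ===== VERDICT (by name: the statement is the Claim_ definition above) =====
set_option maxHeartbeats 1000000 in
theorem build_global_tree_levels_spec : Claim_equal_build_global_tree_levels := by
  intro scope rm _
  unfold Spec_build_global_tree_levels
  unfold build_global_tree_levels build_global_tree_levels_alt
  rw [pvEdges_eq, pvBStep_foldl scope rm [] PySem.Dict.empty]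
  simp only [List.nil_append]
  set pe := (rm.filter (fun e => (!e.2.2.2.isEmpty && scope.contains e.1 && scope.contains e.2.1) && (e.2.2.1 == "parent_of"))).map (fun e => (e.1, e.2.1)) with hpe
  set pp := (rm.filter (fun e => (!e.2.2.2.isEmpty && scope.contains e.1 && scope.contains e.2.1) && (e.2.2.1 == "partner_of"))).map (fun e => (e.1, e.2.1)) with hpp
  have hAkeys : (pe.foldl (fun d pc => d.modify pc.1 PySem.Set.empty (fun s => PySem.Set.add s pc.2)) PySem.Dict.empty).keys
      = PySem.Set.ofList (pe.map (fun pc => pc.1)) := by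
    rw [PySem.Dict.keys_foldl_modify_key pe (fun pc => pc.1) PySem.Set.empty
      (fun _ pc => fun s => PySem.Set.add s pc.2) PySem.Dict.empty]
    rw [PySem.Dict.keys_empty, PySem.Set.update_nil_left]
  have hpbckeys : (pe.foldl (fun d pc => d.modify pc.2 PySem.Set.empty (fun s => PySem.Set.add s pc.1)) PySem.Dict.empty).keys
      = PySem.Set.ofList (pe.map (fun pc => pc.2)) := by
    rw [PySem.Dict.keys_foldl_modify_key pe (fun pc => pc.2) PySem.Set.empty
      (fun _ pc => fun s => PySem.Set.add s pc.1) PySem.Dict.empty]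
    rw [PySem.Dict.keys_empty, PySem.Set.update_nil_left]
  rw [hAkeys, hpbckeys]
  simp only [PySem.Set.ofList_ofList]
  set K := PySem.Set.ofList (pe.map (fun pc => pc.1)) with hK
  set C := PySem.Set.ofList (pe.map (fun pc => pc.2)) with hCd
  have hKnd : K.Nodup := by rw [hK]; exact PySem.Set.nodup_ofList _
  have htop0 : PySem.Set.ofList (K.filter (fun n => !C.contains n)) = PySem.Set.diff K C := by
    have h1 : K.filter (fun n => !C.contains n) = PySem.Set.diff K C := by
      simp [PySem.Set.diff]
    rw [h1, ← h1]
    rw [PySem.Set.ofList_eq_self_of_nodup _ (hKnd.filter _), h1]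
  rw [htop0]
  set roots := (if (PySem.Set.diff K C).isEmpty then K else PySem.Set.diff K C) with hroots
  have hrootsnd : roots.Nodup := by
    rw [hroots]; split_ifs
    · exact hKnd
    · exact PySem.Set.nodup_diff _ _ hKnd
  have hsecgen : ∀ l : List String,
      l.foldl (fun s g => PySem.Set.update s ((pe.foldl (fun d pc => d.modify pc.1 PySem.Set.empty (fun s => PySem.Set.add s pc.2)) PySem.Dict.empty).getD g PySem.Set.empty)) PySem.Set.empty
        = PySem.Set.ofList (l.flatMap (fun g => (pe.filter (fun pc => pc.1 == g)).map (fun pc => pc.2))) := by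
    intro l
    have hfn : (fun (s : PySem.Set String) (g : String) =>
        PySem.Set.update s ((pe.foldl (fun d pc => d.modify pc.1 PySem.Set.empty (fun s => PySem.Set.add s pc.2)) PySem.Dict.empty).getD g PySem.Set.empty))
        = fun s g => PySem.Set.update s (PySem.Set.ofList ((pe.filter (fun pc => pc.1 == g)).map (fun pc => pc.2))) := by
      funext s g
      rw [pvCbpGetD pe g]
    rw [hfn, pvFoldUpdate, PySem.Set.update_empty]
  rw [hsecgen roots]
  set secSeed := PySem.Set.ofList (roots.flatMap (fun g => (pe.filter (fun pc => pc.1 == g)).map (fun pc => pc.2))) with hsecSeed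
  rw [hsecgen secSeed]
  set thrSeed := PySem.Set.ofList (secSeed.flatMap (fun g => (pe.filter (fun pc => pc.1 == g)).map (fun pc => pc.2))) with hthrSeed
  rw [pvALoop_eq pp (2 * pp.length + 1) roots secSeed thrSeed]
  dsimp only
  set adj := ((pp.flatMap (fun pr => [(pr.1, pr.2), (pr.2, pr.1)])).foldl (fun d ab => d.modify ab.1 [] (fun v => v ++ [ab.2])) PySem.Dict.empty) with hadjd
  have hadj : ∀ x m, m ∈ adj.getD x [] ↔ pvE pp x m := by
    intro x m
    rw [hadjd]
    exact pvAdj_mem_iff pp x m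
  set gen2B := PySem.Set.ofList ((pe.filter (fun pc => roots.contains pc.1)).map (fun pc => pc.2)) with hgen2B
  set gen3B := PySem.Set.ofList ((pe.filter (fun pc => gen2B.contains pc.1)).map (fun pc => pc.2)) with hgen3B
  have hseed2 : ∀ s, s ∈ secSeed ↔ s ∈ gen2B := by
    intro s
    rw [hsecSeed, hgen2B]
    simp only [PySem.Set.mem_ofList, List.mem_flatMap, List.mem_map, List.mem_filter, beq_iff_eq,
      PySem.Set.contains_iff]
    constructor
    · rintro ⟨g, hg, pc, ⟨hpc, hg2⟩, hs⟩
      subst hg2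
      exact ⟨pc, ⟨hpc, hg⟩, hs⟩
    · rintro ⟨pc, ⟨hpc, hg⟩, hs⟩
      exact ⟨pc.1, hg, pc, ⟨hpc, rfl⟩, hs⟩
  have hseed3 : ∀ s, s ∈ thrSeed ↔ s ∈ gen3B := by
    intro s
    rw [hthrSeed, hgen3B]
    simp only [PySem.Set.mem_ofList, List.mem_flatMap, List.mem_map, List.mem_filter, beq_iff_eq,
      PySem.Set.contains_iff]
    constructor
    · rintro ⟨g, hg, pc, ⟨hpc, hg2⟩, hs⟩
      subst hg2
      exact ⟨pc, ⟨hpc, (hseed2 pc.1).mp hg⟩, hs⟩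
    · rintro ⟨pc, ⟨hpc, hg⟩, hs⟩
      exact ⟨pc.1, (hseed2 pc.1).mpr hg, pc, ⟨hpc, rfl⟩, hs⟩
  have ndSseed : secSeed.Nodup := by rw [hsecSeed]; exact PySem.Set.nodup_ofList _
  have ndHseed : thrSeed.Nodup := by rw [hthrSeed]; exact PySem.Set.nodup_ofList _
  obtain ⟨ndT_B, memT_B⟩ := pvReach_spec adj pp roots hrootsnd hadj
  obtain ⟨ndS_B, memS_B⟩ := pvReach_spec adj pp gen2B (by rw [hgen2B]; exact PySem.Set.nodup_ofList _) hadj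
  obtain ⟨ndH_B, memH_B⟩ := pvReach_spec adj pp gen3B (by rw [hgen3B]; exact PySem.Set.nodup_ofList _) hadj
  have hTT : ∀ x, x ∈ pvCl pp (2 * pp.length + 1) roots ↔ x ∈ pvReach adj roots :=
    fun x => (pvCl_mem_iff pp roots hrootsnd x).trans (memT_B x).symm
  have hSS : ∀ x, x ∈ pvCl pp (2 * pp.length + 1) secSeed ↔ x ∈ pvReach adj gen2B :=
    fun x => ((pvCl_mem_iff pp secSeed ndSseed x).trans
      (pvR_congr pp secSeed gen2B hseed2 x)).trans (memS_B x).symm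
  have hHH : ∀ x, x ∈ pvCl pp (2 * pp.length + 1) thrSeed ↔ x ∈ pvReach adj gen3B :=
    fun x => ((pvCl_mem_iff pp thrSeed ndHseed x).trans
      (pvR_congr pp thrSeed gen3B hseed3 x)).trans (memH_B x).symm
  have ndT_A := pvCl_nodup pp (2 * pp.length + 1) roots hrootsnd
  have ndS_A := pvCl_nodup pp (2 * pp.length + 1) secSeed ndSseed
  have ndH_A := pvCl_nodup pp (2 * pp.length + 1) thrSeed ndHseed
  have e0 : PySem.List.sorted (pvCl pp (2 * pp.length + 1) roots) (fun x => x) false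
      = PySem.List.sorted (pvReach adj roots) (fun x => x) false :=
    PySem.List.sorted_eq_sorted_of_perm _ _ _ (fun a b h => h)
      ((List.perm_ext_iff_of_nodup ndT_A ndT_B).mpr hTT)
  have e1 : PySem.List.sorted
        (PySem.Set.update (PySem.Set.diff (pvCl pp (2 * pp.length + 1) secSeed) (pvCl pp (2 * pp.length + 1) roots))
          (PySem.Set.diff (PySem.Set.diff (PySem.Set.diff scope (pvCl pp (2 * pp.length + 1) roots))
              (PySem.Set.diff (pvCl pp (2 * pp.length + 1) secSeed) (pvCl pp (2 * pp.length + 1) roots)))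
            (PySem.Set.diff (PySem.Set.diff (pvCl pp (2 * pp.length + 1) thrSeed) (pvCl pp (2 * pp.length + 1) roots))
              (PySem.Set.diff (pvCl pp (2 * pp.length + 1) secSeed) (pvCl pp (2 * pp.length + 1) roots))))) (fun x => x) false
      = PySem.List.sorted
        (PySem.Set.union (PySem.Set.diff (pvReach adj gen2B) (pvReach adj roots))
          (PySem.Set.diff (PySem.Set.diff (PySem.Set.diff scope (pvReach adj roots)) (pvReach adj gen2B)) (pvReach adj gen3B)))
        (fun x => x) false := by
    refine PySem.List.sorted_eq_sorted_of_perm _ _ _ (fun a b h => h)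
      ((List.perm_ext_iff_of_nodup
        (PySem.Set.nodup_update _ _ (PySem.Set.nodup_diff _ _ ndS_A))
        (PySem.Set.nodup_union _ _ (PySem.Set.nodup_diff _ _ ndS_B))).mpr ?_)
    intro x
    simp only [PySem.Set.mem_update, PySem.Set.mem_diff, PySem.Set.mem_union]
    rw [hTT x, hSS x, hHH x]
    tauto
  have e2 : PySem.List.sorted
        (PySem.Set.diff (PySem.Set.diff (pvCl pp (2 * pp.length + 1) thrSeed) (pvCl pp (2 * pp.length + 1) roots))
          (PySem.Set.diff (pvCl pp (2 * pp.length + 1) secSeed) (pvCl pp (2 * pp.length + 1) roots))) (fun x => x) false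
      = PySem.List.sorted
        (PySem.Set.diff (PySem.Set.diff (pvReach adj gen3B) (pvReach adj roots)) (pvReach adj gen2B)) (fun x => x) false := by
    refine PySem.List.sorted_eq_sorted_of_perm _ _ _ (fun a b h => h)
      ((List.perm_ext_iff_of_nodup
        (PySem.Set.nodup_diff _ _ (PySem.Set.nodup_diff _ _ ndH_A))
        (PySem.Set.nodup_diff _ _ (PySem.Set.nodup_diff _ _ ndH_B))).mpr ?_)
    intro x
    simp only [PySem.Set.mem_diff]
    rw [hTT x, hSS x, hHH x]
    tauto
  rw [e0, e1, e2]
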